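-- pv_equiv track=rewrite | github.com/pypi-data/pypi-mirror-385 | packages/elinor/elinor-0.0.21.tar.gz/elinor-0.0.21/elinor/ai/model_summary.py | get_mapping_f2p
-- ===== SOURCE A (Python) =====
-- from collections import defaultdict, OrderedDict, namedtuple, Counter
--
-- def get_mapping_f2p(features, parameters):
--     """
--     Get a mapping from feature to parameter.
--     """
--     def get_main_key(key):
--         return key.rsplit(".", 1)[0]  # 删除最后一个 '.' 后的部分（即 .weight, .bias）
--
--     # 建立映射关系
--     mapping = defaultdict(list)
--     for p_key in parameters.keys():
--         main_key = get_main_key(p_key)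
--         for f_key in features.keys():
--             if f_key.startswith(main_key):
--                 mapping[f_key].append(p_key)
--
--     return mapping
-- ===== SOURCE B (Python) =====
-- def get_mapping_f2p(features, parameters):
--     """
--     Get a mapping from feature to parameter.
--     """
--     # Sort the feature keys once; prefix matches form a contiguous block in sorted
--     # order, found per parameter by binary search instead of scanning all features.
--     f_keys = list(features.keys())
--     pos = {f_key: i for i, f_key in enumerate(f_keys)}
--     sf = sorted(f_keys)
--     mapping = {}
--     for p_key in parameters.keys():
--         main_key = p_key.rsplit(".", 1)[0]
--         # lower bound: first index of sf whose entry is >= main_key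
--         lo, hi = 0, len(sf)
--         while lo < hi:
--             mid = (lo + hi) // 2
--             if sf[mid] < main_key:
--                 lo = mid + 1
--             else:
--                 hi = mid
--         hits = []
--         while lo < len(sf) and sf[lo].startswith(main_key):
--             hits.append(sf[lo])
--             lo += 1
--         for f_key in sorted(hits, key=pos.__getitem__):  # report matches in feature order
--             mapping.setdefault(f_key, []).append(p_key)
--     return mapping
-- ===== Notes on version B (the rewrite author's own statement) =====
-- stated objective: faster
-- what changed: A tests every (parameter, feature) pair with startswith; B sorts the feature keys once, and per parameter binary-searches the contiguous sorted block of keys having that parameter's main key as a prefix, reporting the block's matches in original feature order.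
import Mathlib
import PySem

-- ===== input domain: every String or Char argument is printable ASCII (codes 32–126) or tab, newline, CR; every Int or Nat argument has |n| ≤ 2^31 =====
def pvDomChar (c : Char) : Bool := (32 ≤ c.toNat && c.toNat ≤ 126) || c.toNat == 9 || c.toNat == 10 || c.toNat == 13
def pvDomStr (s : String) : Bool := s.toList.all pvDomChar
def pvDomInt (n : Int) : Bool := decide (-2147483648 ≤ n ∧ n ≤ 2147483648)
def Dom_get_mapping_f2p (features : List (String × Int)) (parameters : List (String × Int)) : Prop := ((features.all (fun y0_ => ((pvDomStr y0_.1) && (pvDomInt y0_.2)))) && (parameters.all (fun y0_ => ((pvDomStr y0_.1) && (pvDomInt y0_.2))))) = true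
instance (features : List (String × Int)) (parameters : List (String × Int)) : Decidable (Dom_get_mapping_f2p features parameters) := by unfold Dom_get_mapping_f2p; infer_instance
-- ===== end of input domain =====

-- B replaces A's all-pairs startswith scan by sorting the feature keys once and
-- binary-searching, per parameter, the contiguous block of keys with that prefix (objective: faster).

-- hand port of s.rsplit(".", 1)[0] (exact: everything before the last '.', or s itself when there is none);
-- used by both ports, as get_main_key is in A and inline in B
def pvMainKey (s : String) : String :=
  let r := PySem.Str.rfind s "."
  if r = -1 then s else PySem.Str.slice s none (some r)

-- ===== PORT A =====
def get_mapping_f2p (features : List (String × Int)) (parameters : List (String × Int)) : List (String × List String) :=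
  let fkeys := (PySem.Dict.ofList features).keys
  let pkeys := (PySem.Dict.ofList parameters).keys
  (pkeys.foldl (fun (mapping : PySem.Dict String (List String)) p_key =>
      let main_key := pvMainKey p_key
      fkeys.foldl (fun m f_key =>
        if PySem.Str.startswith f_key main_key then m.modify f_key [] (fun v => v ++ [p_key]) else m) mapping)
    PySem.Dict.empty).items

-- ===== PORT B =====
-- B's hand-written binary-search loop 'while lo < hi: mid = (lo+hi)//2; …' (indices stay in range,
-- so sf[mid] is pyGetD); exact step-for-step port
def pvLower (sf : List String) (m : String) (lo hi : Nat) : Nat :=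
  if lo < hi then
    if PySem.List.pyGetD sf (((lo + hi) / 2 : Nat) : Int) "" < m then pvLower sf m ((lo + hi) / 2 + 1) hi
    else pvLower sf m lo ((lo + hi) / 2)
  else lo
termination_by hi - lo
decreasing_by all_goals omega

-- B's scan loop 'while lo < len(sf) and sf[lo].startswith(main_key): hits.append(sf[lo]); lo += 1'
def pvCollect (sf : List String) (m : String) (i : Nat) : List String :=
  if i < sf.length then
    if PySem.Str.startswith (PySem.List.pyGetD sf (i : Int) "") m then
      PySem.List.pyGetD sf (i : Int) "" :: pvCollect sf m (i + 1)
    else []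
  else []
termination_by sf.length - i
decreasing_by omega

def get_mapping_f2p_alt (features : List (String × Int)) (parameters : List (String × Int)) : List (String × List String) :=
  let f_keys := (PySem.Dict.ofList features).keys
  -- pos = {f_key: i for i, f_key in enumerate(f_keys)}
  let pos : PySem.Dict String Int :=
    (PySem.List.enumerate f_keys 0).foldl (fun d p => d.insert p.2 p.1) PySem.Dict.empty
  let sf := PySem.List.sorted f_keys (fun x => x) false
  ((PySem.Dict.ofList parameters).keys.foldl (fun (mapping : PySem.Dict String (List String)) p_key =>
      let main_key := pvMainKey p_key
      let lo := pvLower sf main_key 0 sf.length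
      let hits := pvCollect sf main_key lo
      -- pos[f] is never missing (hits ⊆ f_keys), so pos.__getitem__ is getD; setdefault(f,[]).append(p) is modify
      (PySem.List.sorted hits (fun f => pos.getD f 0) false).foldl
        (fun m f_key => m.modify f_key [] (fun v => v ++ [p_key])) mapping)
    PySem.Dict.empty).items

-- ===== PRECONDITION & SPEC =====
def Spec_get_mapping_f2p (features : List (String × Int)) (parameters : List (String × Int)) (out : List (String × List String)) : Prop := out = get_mapping_f2p_alt features parameters
instance (features : List (String × Int)) (parameters : List (String × Int)) (out : List (String × List String)) : Decidable (Spec_get_mapping_f2p features parameters out) := by unfold Spec_get_mapping_f2p; infer_instance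

-- ===== CLAIM (what is proved, stated in full; the proofs are below) =====
def Claim_equal_get_mapping_f2p : Prop := ∀ (features : List (String × Int)) (parameters : List (String × Int)), Dom_get_mapping_f2p features parameters → Spec_get_mapping_f2p features parameters (get_mapping_f2p features parameters)

-- ===== LEMMAS AND PROOFS =====

-- a prefix is ≤ its extension, and anything order-between a string and an extension of m
-- keeps m as a prefix (chars compared exactly as Python compares them)
theorem pvNotLex_of_prefix : ∀ (m t : List Char), ¬ List.Lex (· < ·) (m ++ t) m := by
  intro m
  induction m with
  | nil => intro t h; cases h
  | cons c m' ih =>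
    intro t h
    cases h with
    | cons h => exact ih t h
    | rel hr => exact lt_irrefl c hr

theorem pvPrefix_between_lex : ∀ (m a x : List Char),
    ¬ List.Lex (· < ·) a m → ¬ List.Lex (· < ·) x a → m <+: x → m <+: a := by
  intro m
  induction m with
  | nil => intro a x _ _ _; exact a.nil_prefix
  | cons c m' ih =>
    intro a x h1 h2 h3
    cases a with
    | nil => exact absurd List.Lex.nil h1
    | cons d a' =>
      cases x with
      | nil => exact absurd h3.length_le (by simp)
      | cons b x' =>
        obtain ⟨hcb, hmx⟩ := List.cons_prefix_cons.mp h3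
        subst hcb
        rcases lt_trichotomy c d with hcd | hcd | hcd
        · exact absurd (List.Lex.rel hcd) h2
        · subst hcd
          exact List.cons_prefix_cons.mpr ⟨rfl,
            ih a' x' (fun h => h1 (List.Lex.cons h)) (fun h => h2 (List.Lex.cons h)) hmx⟩
        · exact absurd (List.Lex.rel hcd) h1

theorem pvNotLt_of_startswith {f m : String} (h : PySem.Str.startswith f m = true) : ¬ f < m := by
  obtain ⟨t, ht⟩ := PySem.Chars.startswith_iff f.toList m.toList |>.mp (by simpa using h)
  rw [String.lt_iff_toList_lt]
  intro hl
  exact pvNotLex_of_prefix m.toList t (ht ▸ (List.lt_iff_lex_lt _ _).mp hl)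

theorem pvStartswith_between {m a x : String} (h1 : ¬ a < m) (h2 : ¬ x < a)
    (h3 : PySem.Str.startswith x m = true) : PySem.Str.startswith a m = true := by
  have hx : m.toList <+: x.toList := PySem.Chars.startswith_iff _ _ |>.mp (by simpa using h3)
  rw [String.lt_iff_toList_lt] at h1 h2
  have ha : m.toList <+: a.toList :=
    pvPrefix_between_lex _ _ _ (fun h => h1 ((List.lt_iff_lex_lt _ _).mpr h))
      (fun h => h2 ((List.lt_iff_lex_lt _ _).mpr h)) hx
  simpa using (PySem.Chars.startswith_iff a.toList m.toList).mpr ha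

-- the scan loop collects the takeWhile of the tail
theorem pvCollect_eq_takeWhile (sf : List String) (m : String) :
    ∀ i, pvCollect sf m i = (sf.drop i).takeWhile (fun s => PySem.Str.startswith s m) := by
  intro i
  induction hn : sf.length - i using Nat.strong_induction_on generalizing i with
  | _ n ih =>
    rw [pvCollect]
    by_cases h : i < sf.length
    · rw [List.drop_eq_getElem_cons h, List.takeWhile_cons]
      have hg : PySem.List.pyGetD sf (i : Int) "" = sf[i] := by
        rw [PySem.List.pyGetD_natCast]; exact List.getD_eq_getElem _ _ h
      rw [if_pos h, hg]
      by_cases hs : PySem.Str.startswith sf[i] m = true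
      · rw [if_pos hs, if_pos hs, ih (sf.length - (i + 1)) (by omega) (i + 1) rfl]
      · rw [if_neg hs, if_neg hs]
    · rw [if_neg h, List.drop_eq_nil_of_le (by omega), List.takeWhile_nil]

-- the binary search returns the first index whose entry is not < m (on a sorted list)
theorem pvLower_spec (sf : List String) (m : String) (hs : sf.Pairwise (· ≤ ·)) :
    ∀ lo hi, lo ≤ hi → hi ≤ sf.length →
    (∀ j (_ : j < sf.length), j < lo → sf[j] < m) →
    (∀ j (_ : j < sf.length), hi ≤ j → ¬ sf[j] < m) →
    pvLower sf m lo hi ≤ sf.length ∧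
      (∀ j (_ : j < sf.length), j < pvLower sf m lo hi → sf[j] < m) ∧
      (∀ j (_ : j < sf.length), pvLower sf m lo hi ≤ j → ¬ sf[j] < m) := by
  intro lo hi
  induction hn : hi - lo using Nat.strong_induction_on generalizing lo hi with
  | _ n ih =>
    intro hlohi hhile hbelow habove
    rw [pvLower]
    by_cases h : lo < hi
    · rw [if_pos h]
      have hmid : (lo + hi) / 2 < sf.length := by omega
      have hg : PySem.List.pyGetD sf (((lo + hi) / 2 : Nat) : Int) "" = sf[(lo + hi) / 2] := by
        rw [PySem.List.pyGetD_natCast]; exact List.getD_eq_getElem _ _ hmid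
      rw [hg]
      have hmono : ∀ j k (_ : j < sf.length) (_ : k < sf.length), j ≤ k → sf[j] ≤ sf[k] := by
        intro j k hj hk hjk
        rcases Nat.lt_or_ge j k with hlt | hge
        · exact (List.pairwise_iff_getElem.mp hs) j k hj hk hlt
        · have : j = k := by omega
          subst this; exact le_refl _
      by_cases hc : sf[(lo + hi) / 2] < m
      · rw [if_pos hc]
        exact ih (hi - ((lo + hi) / 2 + 1)) (by omega) _ _ rfl (by omega) hhile
          (fun j hj hjlt => lt_of_le_of_lt (hmono j ((lo + hi) / 2) hj hmid (by omega)) hc)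
          habove
      · rw [if_neg hc]
        exact ih ((lo + hi) / 2 - lo) (by omega) _ _ rfl (by omega) (by omega) hbelow
          (fun j hj hjge hjlt => hc (lt_of_le_of_lt (hmono ((lo + hi) / 2) j hmid hj hjge) hjlt))
    · rw [if_neg h]
      have : lo = hi := by omega
      subst this
      exact ⟨by omega, hbelow, habove⟩

-- on a sorted list every element of which is ≥ m, the startswith-m block is an initial segment
theorem pvTakeWhile_eq_filter (m : String) :
    ∀ (l : List String), l.Pairwise (· ≤ ·) → (∀ x ∈ l, ¬ x < m) →
    l.takeWhile (fun s => PySem.Str.startswith s m) = l.filter (fun s => PySem.Str.startswith s m) := by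
  intro l
  induction l with
  | nil => intro _ _; rfl
  | cons a t ih =>
    intro hp hge
    rw [List.takeWhile_cons, List.filter_cons]
    by_cases hs : PySem.Str.startswith a m = true
    · rw [if_pos hs, if_pos hs, ih hp.of_cons (fun x hx => hge x (List.mem_cons_of_mem a hx))]
    · rw [if_neg hs, if_neg hs]
      have hnil : t.filter (fun s => PySem.Str.startswith s m) = [] := by
        rw [List.filter_eq_nil_iff]
        intro x hx hsx
        exact hs (pvStartswith_between (hge a (List.mem_cons_self))
          (not_lt.mpr ((List.pairwise_cons.mp hp).1 x hx)) hsx)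
      rw [hnil]

-- the position dict is index-of in f_keys
theorem pvPos_getD : ∀ (fs : List String) (s : Int) (d : PySem.Dict String Int) (f : String),
    fs.Nodup →
    ((PySem.List.enumerate fs s).foldl (fun d p => d.insert p.2 p.1) d).getD f 0
      = if f ∈ fs then s + (fs.idxOf f : Int) else d.getD f 0 := by
  intro fs
  induction fs with
  | nil => intro s d f _; simp [PySem.List.enumerate_nil]
  | cons a t ih =>
    intro s d f hnd
    rw [PySem.List.enumerate_cons, List.foldl_cons,
      ih (s + 1) (d.insert a s) f hnd.of_cons]
    by_cases hft : f ∈ t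
    · have hfa : f ≠ a := fun h => (List.nodup_cons.mp hnd).1 (h ▸ hft)
      rw [if_pos hft, if_pos (List.mem_cons_of_mem a hft), List.idxOf_cons_ne _ (fun h => hfa h.symm)]
      push_cast
      ring
    · by_cases hfa : f = a
      · subst hfa
        rw [if_neg hft, if_pos (List.mem_cons_self), List.idxOf_cons_self,
          PySem.Dict.getD_insert_self]
        simp
      · rw [if_neg hft, if_neg (by simp [hfa, hft]), PySem.Dict.getD_insert]
        simp [hfa]

-- per parameter: binary search + scan + re-sort by position = the features that match, in input order
theorem pvHits_eq_filter (features : List (String × Int)) (m : String) :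
    PySem.List.sorted
      (pvCollect (PySem.List.sorted (PySem.Dict.ofList features).keys (fun x => x) false) m
        (pvLower (PySem.List.sorted (PySem.Dict.ofList features).keys (fun x => x) false) m 0
          (PySem.List.sorted (PySem.Dict.ofList features).keys (fun x => x) false).length))
      (fun f => ((PySem.List.enumerate (PySem.Dict.ofList features).keys 0).foldl
          (fun d p => d.insert p.2 p.1) PySem.Dict.empty).getD f 0) false
    = (PySem.Dict.ofList features).keys.filter (fun f => PySem.Str.startswith f m) := by
  set fs := (PySem.Dict.ofList features).keys with hfs
  have hnd : fs.Nodup := PySem.Dict.nodup_keys_ofList features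
  set sf := PySem.List.sorted fs (fun x => x) false with hsf
  have hsp : sf.Pairwise (· ≤ ·) := PySem.List.sorted_pairwise fs (fun x => x)
  set lo := pvLower sf m 0 sf.length with hlo
  obtain ⟨hlole, hbelow, habove⟩ := pvLower_spec sf m hsp 0 sf.length (by omega) (by omega)
    (by omega) (fun j hj hge => by omega)
  -- the scan collects sf.filter (startswith · m)
  have hscan : pvCollect sf m lo = sf.filter (fun s => PySem.Str.startswith s m) := by
    rw [pvCollect_eq_takeWhile]
    have hdp : (sf.drop lo).Pairwise (· ≤ ·) := hsp.drop
    have hdge : ∀ x ∈ sf.drop lo, ¬ x < m := by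
      intro x hx
      obtain ⟨k, hk, hxe⟩ := List.mem_iff_getElem.mp hx
      rw [List.getElem_drop] at hxe
      have hk' : lo + k < sf.length := by simp [List.length_drop] at hk; omega
      exact hxe ▸ habove (lo + k) hk' (by omega)
    rw [pvTakeWhile_eq_filter m _ hdp hdge]
    conv_rhs => rw [← List.take_append_drop lo sf]
    rw [List.filter_append]
    have htake : (sf.take lo).filter (fun s => PySem.Str.startswith s m) = [] := by
      rw [List.filter_eq_nil_iff]
      intro x hx hsx
      obtain ⟨k, hk, hxe⟩ := List.mem_iff_getElem.mp hx
      rw [List.getElem_take] at hxe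
      have hk' : k < lo ∧ k < sf.length := by simp [List.length_take] at hk; omega
      have hlt : x < m := hxe ▸ hbelow k hk'.2 hk'.1
      exact absurd hlt (pvNotLt_of_startswith hsx)
    rw [htake, List.nil_append]
  rw [hscan]
  -- re-sorting by position restores the input order: the filter of fs
  apply PySem.List.sorted_eq_of_perm_of_pairwise_lt
  · exact ((PySem.List.sorted_perm fs (fun x => x) false).filter _).symm
  · have hfp : fs.Pairwise (fun a b =>
        ((PySem.List.enumerate fs 0).foldl (fun d p => d.insert p.2 p.1) PySem.Dict.empty).getD a 0 <
        ((PySem.List.enumerate fs 0).foldl (fun d p => d.insert p.2 p.1) PySem.Dict.empty).getD b 0) := by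
      rw [List.pairwise_iff_getElem]
      intro i j hi hj hij
      rw [pvPos_getD fs 0 _ _ hnd, pvPos_getD fs 0 _ _ hnd,
        if_pos (List.getElem_mem hi), if_pos (List.getElem_mem hj),
        List.Nodup.idxOf_getElem hnd i hi, List.Nodup.idxOf_getElem hnd j hj]
      simpa using hij
    exact hfp.sublist List.filter_sublist

theorem pvMain_theorem (features parameters : List (String × Int)) :
    get_mapping_f2p features parameters = get_mapping_f2p_alt features parameters := by
  simp only [get_mapping_f2p, get_mapping_f2p_alt]
  congr 1
  apply PySem.List.foldl_congr_mem
  intro mapping p_key _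
  rw [pvHits_eq_filter features (pvMainKey p_key)]
  exact List.foldl_filter.symm

-- ===== VERDICT (by name: the statement is the Claim_ definition above) =====
theorem get_mapping_f2p_spec : Claim_equal_get_mapping_f2p := by
  intro features parameters _
  unfold Spec_get_mapping_f2p
  exact pvMain_theorem features parameters
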